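-- pv_equiv track=rewrite | github.com/anthonytk31415/python-data-structures-and-algorithms | problems/lc-contest/findMaximumScore.py | findMaximumScore1
-- ===== SOURCE A (Python) =====
-- def findMaximumScore1(nums: list[int]) -> int:
--     dp = [0]*len(nums)
--     for j in range(1, len(nums)):
--         res = 0
--         for i in range(j):
--             curRes = dp[i] + (j-i)*nums[i]
--             res = max(curRes, res)
--         dp[j] = res
--     return dp[-1]
-- ===== SOURCE B (Python) =====
-- def findMaximumScore1(nums: list[int]) -> int:
--     best = nums[0]
--     score = 0
--     for x in nums[1:]:
--         score += max(best, 0)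
--         best = max(best, x)
--     return score
-- ===== Notes on version B (the rewrite author's own statement) =====
-- stated objective: faster
-- what changed: Replaces the O(n^2) DP (inner scan over all earlier indices for each j) with a single O(n) pass that keeps a running prefix maximum and adds its non-negative part at every step.
import Mathlib
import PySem

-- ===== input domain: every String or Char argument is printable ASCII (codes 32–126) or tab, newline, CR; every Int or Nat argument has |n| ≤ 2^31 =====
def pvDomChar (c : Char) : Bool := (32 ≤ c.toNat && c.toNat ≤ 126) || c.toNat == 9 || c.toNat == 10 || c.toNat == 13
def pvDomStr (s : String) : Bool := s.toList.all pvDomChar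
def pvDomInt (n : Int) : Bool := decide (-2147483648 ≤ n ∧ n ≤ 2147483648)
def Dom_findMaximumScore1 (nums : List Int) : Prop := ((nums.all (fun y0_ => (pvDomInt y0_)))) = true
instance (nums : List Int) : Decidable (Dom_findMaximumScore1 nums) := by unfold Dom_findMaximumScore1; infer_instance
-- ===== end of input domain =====

-- B changes the algorithm: one pass with a running prefix maximum instead of the quadratic DP.
-- Equivalence is about the return value; neither program mutates its argument.

-- ===== PORT A =====
def findMaximumScore1 (nums : List Int) : Int :=
  let dp : List Int := List.replicate nums.length 0
  let dp := (PySem.List.pyRange 1 (nums.length : Int) 1).foldl (fun dp j =>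
    let res := (PySem.List.pyRange 0 j 1).foldl (fun res i =>
        let curRes := PySem.List.pyGetD dp i 0 + (j - i) * PySem.List.pyGetD nums i 0
        max curRes res) 0
    PySem.List.pySetD dp j res) dp
  PySem.List.pyGetD dp (-1) 0

-- ===== PORT B =====
def findMaximumScore1_alt (nums : List Int) : Int :=
  match nums with
  | [] => 0  -- unreachable under Pre_ (Python B raises IndexError on [])
  | x :: xs =>
    (xs.foldl (fun (p : Int × Int) y => (p.1 + max p.2 0, max p.2 y)) ((0 : Int), x)).1

-- ===== PRECONDITION & SPEC =====
-- Pre_ excludes only the empty list, on which both Pythons raise IndexError.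
def Pre_findMaximumScore1 (nums : List Int) : Prop := nums ≠ []
instance (nums : List Int) : Decidable (Pre_findMaximumScore1 nums) := by
  unfold Pre_findMaximumScore1; infer_instance
def pvWitness_findMaximumScore1 : List Int := [3, -1, 2]

def Spec_findMaximumScore1 (nums : List Int) (out : Int) : Prop := out = findMaximumScore1_alt nums
instance (nums : List Int) (out : Int) : Decidable (Spec_findMaximumScore1 nums out) := by unfold Spec_findMaximumScore1; infer_instance

-- ===== CLAIM (what is proved, stated in full; the proofs are below) =====
def Claim_equal_findMaximumScore1 : Prop := ∀ (nums : List Int), Dom_findMaximumScore1 nums → Pre_findMaximumScore1 nums → Spec_findMaximumScore1 nums (findMaximumScore1 nums)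

-- ===== LEMMAS AND PROOFS =====

-- prefix maximum of x :: xs over the first k+... : max of x and the first k elements of xs
def pvPm (x : Int) (xs : List Int) (k : Nat) : Int := (xs.take k).foldl max x

-- greedy partial sum: S (k) = Σ_{t<k} max (pm t) 0
def pvS (x : Int) (xs : List Int) : Nat → Int
  | 0 => 0
  | k + 1 => pvS x xs k + max (pvPm x xs k) 0

theorem pvPm_succ (x : Int) (xs : List Int) (k : Nat) (h : k < xs.length) :
    pvPm x xs (k + 1) = max (pvPm x xs k) xs[k] := by
  have h2 : xs.take (k + 1) = xs.take k ++ [xs[k]] := by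
    rw [List.take_succ, List.getElem?_eq_getElem h]; rfl
  unfold pvPm
  rw [h2, List.foldl_append]
  simp

theorem pvPm_stable (x : Int) (xs : List Int) (k : Nat) (h : xs.length ≤ k) :
    pvPm x xs (k + 1) = pvPm x xs k := by
  unfold pvPm
  rw [List.take_of_length_le h, List.take_of_length_le (Nat.le_succ_of_le h)]

theorem pvPm_le_succ (x : Int) (xs : List Int) (k : Nat) :
    pvPm x xs k ≤ pvPm x xs (k + 1) := by
  by_cases h : k < xs.length
  · rw [pvPm_succ x xs k h]; exact le_max_left _ _
  · rw [pvPm_stable x xs k (Nat.le_of_not_lt h)]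

theorem pvPm_mono (x : Int) (xs : List Int) {j k : Nat} (h : j ≤ k) :
    pvPm x xs j ≤ pvPm x xs k := by
  induction k with
  | zero => simp_all
  | succ k ih =>
    rcases Nat.lt_or_ge j (k + 1) with h' | h'
    · exact le_trans (ih (Nat.lt_succ_iff.mp h')) (pvPm_le_succ x xs k)
    · have : j = k + 1 := Nat.le_antisymm h h'
      simp [this]

theorem pvElem_le_pm (x : Int) (xs : List Int) (i : Nat) (h : i < xs.length + 1) :
    (x :: xs).getD i 0 ≤ pvPm x xs i := by
  cases i with
  | zero => simp [pvPm]
  | succ i =>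
    have hi : i < xs.length := by omega
    rw [pvPm_succ x xs i hi]
    simp [List.getD, List.getElem?_eq_getElem hi]

-- the greedy sum grows at least linearly with slope any c ≤ max (pm i) 0
theorem pvS_linear_lb (x : Int) (xs : List Int) (i : Nat) (c : Int)
    (hc : c ≤ max (pvPm x xs i) 0) :
    ∀ d : Nat, pvS x xs i + d * c ≤ pvS x xs (i + d) := by
  intro d
  induction d with
  | zero => simp
  | succ d ih =>
    have h1 : max (pvPm x xs i) 0 ≤ max (pvPm x xs (i + d)) 0 :=
      max_le_max_right 0 (pvPm_mono x xs (Nat.le_add_right i d))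
    have : pvS x xs (i + (d + 1)) = pvS x xs (i + d) + max (pvPm x xs (i + d)) 0 := by
      show pvS x xs ((i + d) + 1) = _
      rfl
    rw [this]
    push_cast
    nlinarith [ih]

theorem pvS_nonneg (x : Int) (xs : List Int) (k : Nat) : 0 ≤ pvS x xs k := by
  induction k with
  | zero => simp [pvS]
  | succ k ih => have := le_max_right (pvPm x xs k) 0; simp [pvS]; omega

-- per-term upper bound: S i + (j-i) * nums[i] ≤ S j  for i ≤ j
theorem pvTerm_le (x : Int) (xs : List Int) (i j : Nat) (hij : i ≤ j) (hi : i < xs.length + 1) :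
    pvS x xs i + ((j : Int) - (i : Int)) * (x :: xs).getD i 0 ≤ pvS x xs j := by
  have hc : (x :: xs).getD i 0 ≤ max (pvPm x xs i) 0 :=
    le_trans (pvElem_le_pm x xs i hi) (le_max_left _ _)
  have := pvS_linear_lb x xs i ((x :: xs).getD i 0) hc (j - i)
  have hd : i + (j - i) = j := by omega
  rw [hd] at this
  have hcast : ((j - i : Nat) : Int) = (j : Int) - (i : Int) := by omega
  rw [hcast] at this
  exact this

-- when the prefix max is ≤ 0 up to j-1, the greedy sum is 0
theorem pvS_eq_zero (x : Int) (xs : List Int) (j : Nat) (h : ∀ k < j, pvPm x xs k ≤ 0) :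
    pvS x xs j = 0 := by
  induction j with
  | zero => rfl
  | succ j ih =>
    have h1 : pvS x xs j = 0 := ih (fun k hk => h k (Nat.lt_succ_of_lt hk))
    have h2 : pvPm x xs j ≤ 0 := h j (Nat.lt_succ_self j)
    simp [pvS, h1]
    omega

-- existence of an index achieving the prefix max, with the exact sum identity
theorem pvArgmax (x : Int) (xs : List Int) (j : Nat) (hpos : 0 < pvPm x xs j) :
    ∃ i ≤ j, i < xs.length + 1 ∧ (x :: xs).getD i 0 = pvPm x xs j ∧
      pvS x xs (j + 1) = pvS x xs i + ((j : Int) + 1 - (i : Int)) * pvPm x xs j := by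
  induction j with
  | zero =>
    refine ⟨0, le_refl _, by omega, by simp [pvPm], ?_⟩
    have hx : pvPm x xs 0 = x := by simp [pvPm]
    simp [pvS, hx] at hpos ⊢
    omega
  | succ j ih =>
    by_cases hnew : j < xs.length ∧ pvPm x xs j < xs[j]!
    · obtain ⟨hj, hlt⟩ := hnew
      have hpm : pvPm x xs (j + 1) = xs[j] := by
        rw [pvPm_succ x xs j hj]
        have : xs[j]! = xs[j] := by simp [List.getElem!_eq_getElem?_getD, List.getElem?_eq_getElem hj]
        rw [this] at hlt
        omega
      refine ⟨j + 1, le_refl _, by omega, ?_, ?_⟩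
      · rw [hpm]; simp [List.getD, List.getElem?_eq_getElem hj]
      · show pvS x xs (j + 1) + max (pvPm x xs (j + 1)) 0 = _
        have : max (pvPm x xs (j + 1)) 0 = pvPm x xs (j + 1) := by omega
        rw [this]
        push_cast
        ring
    · have hpm : pvPm x xs (j + 1) = pvPm x xs j := by
        by_cases hj : j < xs.length
        · rw [pvPm_succ x xs j hj]
          have : xs[j]! = xs[j] := by simp [List.getElem!_eq_getElem?_getD, List.getElem?_eq_getElem hj]
          have hle : xs[j] ≤ pvPm x xs j := by
            rcases not_and_or.mp hnew with h | h
            · exact absurd hj h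
            · rw [this] at h; omega
          omega
        · exact pvPm_stable x xs j (Nat.le_of_not_lt hj)
      rw [hpm] at hpos ⊢
      obtain ⟨i, hij, hin, hval, hsum⟩ := ih hpos
      refine ⟨i, Nat.le_succ_of_le hij, hin, hval, ?_⟩
      show pvS x xs (j + 1) + max (pvPm x xs (j + 1)) 0 = _
      rw [hpm, hsum]
      have : max (pvPm x xs j) 0 = pvPm x xs j := by omega
      rw [this]
      push_cast
      ring

-- generic foldl-max lemmas for A's inner loop
theorem pvFoldMax_le {α : Type} (f : α → Int) (c : Int) :
    ∀ (l : List α) (init : Int), init ≤ c → (∀ a ∈ l, f a ≤ c) →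
      l.foldl (fun r a => max (f a) r) init ≤ c := by
  intro l
  induction l with
  | nil => intro init h _; simpa using h
  | cons a l ih =>
    intro init hinit hall
    simp only [List.foldl_cons]
    exact ih _ (max_le (hall a (by simp)) hinit) (fun b hb => hall b (by simp [hb]))

theorem pvFoldMax_ge_init {α : Type} (f : α → Int) :
    ∀ (l : List α) (init : Int), init ≤ l.foldl (fun r a => max (f a) r) init := by
  intro l
  induction l with
  | nil => simp
  | cons a l ih =>
    intro init
    simp only [List.foldl_cons]
    exact le_trans (le_max_right (f a) init) (ih _)

theorem pvFoldMax_ge_elem {α : Type} (f : α → Int) :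
    ∀ (l : List α) (init : Int) (a : α), a ∈ l → f a ≤ l.foldl (fun r a => max (f a) r) init := by
  intro l
  induction l with
  | nil => simp
  | cons b l ih =>
    intro init a ha
    rcases List.mem_cons.mp ha with h | h
    · subst h
      simp only [List.foldl_cons]
      exact le_trans (le_max_left (f a) init) (pvFoldMax_ge_init f l _)
    · exact ih _ a h

-- A's inner loop computes S j when dp holds S on indices < j
theorem pvInner (x : Int) (xs : List Int) (dp : List Int) (j : Nat)
    (hj : 0 < j) (hjn : j ≤ xs.length)
    (hdp : ∀ i < j, dp.getD i 0 = pvS x xs i) :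
    (List.range j).foldl
      (fun res i => max (dp.getD i 0 + ((j : Int) - (i : Int)) * (x :: xs).getD i 0) res) 0
      = pvS x xs j := by
  set f : Nat → Int := fun i => dp.getD i 0 + ((j : Int) - (i : Int)) * (x :: xs).getD i 0 with hf
  have hval : ∀ i < j, f i = pvS x xs i + ((j : Int) - (i : Int)) * (x :: xs).getD i 0 := by
    intro i hi; simp only [hf]; rw [hdp i hi]
  apply le_antisymm
  · apply pvFoldMax_le f (pvS x xs j) (List.range j) 0 (pvS_nonneg x xs j)
    intro i hi
    have hij : i < j := List.mem_range.mp hi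
    rw [hval i hij]
    exact pvTerm_le x xs i j (Nat.le_of_lt hij) (by omega)
  · by_cases hpos : 0 < pvPm x xs (j - 1)
    · obtain ⟨i, hij, hin, hvalm, hsum⟩ := pvArgmax x xs (j - 1) hpos
      have hj1 : j - 1 + 1 = j := by omega
      rw [hj1] at hsum
      have hcast : ((j - 1 : Nat) : Int) + 1 = (j : Int) := by omega
      rw [hcast] at hsum
      have hilt : i < j := by omega
      have : f i = pvS x xs j := by
        rw [hval i hilt, hvalm, ← hsum]
      rw [← this]
      exact pvFoldMax_ge_elem f (List.range j) 0 i (List.mem_range.mpr hilt)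
    · have hz : pvS x xs j = 0 := by
        apply pvS_eq_zero
        intro k hk
        have := pvPm_mono x xs (show k ≤ j - 1 by omega)
        omega
      rw [hz]
      exact pvFoldMax_ge_init f (List.range j) 0

-- the dp list after t outer iterations
def pvDpAt (x : Int) (xs : List Int) (t : Nat) : List Int :=
  (List.range (xs.length + 1)).map (fun k => if k < t + 1 then pvS x xs k else 0)

theorem pvDpAt_getD (x : Int) (xs : List Int) (t k : Nat) (hk : k < xs.length + 1) :
    (pvDpAt x xs t).getD k 0 = if k < t + 1 then pvS x xs k else 0 := by
  unfold pvDpAt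
  rw [List.getD_eq_getElem?_getD]
  simp [List.getElem?_map, List.getElem?_range hk]

theorem pvDpAt_zero (x : Int) (xs : List Int) :
    pvDpAt x xs 0 = List.replicate (xs.length + 1) 0 := by
  unfold pvDpAt
  apply List.ext_getElem
  · simp
  · intro i h1 h2
    simp only [List.getElem_map, List.getElem_range, List.getElem_replicate]
    split_ifs with h
    · have : i = 0 := by omega
      subst this; rfl
    · rfl

theorem pvDpAt_set (x : Int) (xs : List Int) (t : Nat) (ht : t + 1 < xs.length + 1) :
    (pvDpAt x xs t).set (t + 1) (pvS x xs (t + 1)) = pvDpAt x xs (t + 1) := by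
  unfold pvDpAt
  apply List.ext_getElem
  · simp
  · intro i h1 h2
    simp only [List.length_set, List.length_map, List.length_range] at h1
    rw [List.getElem_set]
    simp only [List.getElem_map, List.getElem_range]
    by_cases hi : i = t + 1
    · simp [hi]
    · rw [if_neg (fun h => hi h.symm)]
      by_cases h : i < t + 1
      · rw [if_pos h, if_pos (by omega)]
      · rw [if_neg h, if_neg (by omega)]

-- B's fold: shifting lemmas and characterization
theorem pvPm_shift (x y : Int) (ys : List Int) (k : Nat) :
    pvPm x (y :: ys) (k + 1) = pvPm (max x y) ys k := by
  unfold pvPm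
  simp [List.take_succ_cons]

theorem pvS_shift (x y : Int) (ys : List Int) (k : Nat) :
    pvS x (y :: ys) (k + 1) = max x 0 + pvS (max x y) ys k := by
  induction k with
  | zero => simp [pvS, pvPm]
  | succ k ih =>
    show pvS x (y :: ys) (k + 1) + max (pvPm x (y :: ys) (k + 1)) 0 = _
    rw [ih, pvPm_shift]
    show _ = max x 0 + (pvS (max x y) ys k + max (pvPm (max x y) ys k) 0)
    ring

theorem pvAltFold (xs : List Int) : ∀ (x s : Int),
    (xs.foldl (fun (p : Int × Int) y => (p.1 + max p.2 0, max p.2 y)) (s, x)).1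
      = s + pvS x xs xs.length := by
  induction xs with
  | nil => intro x s; simp [pvS]
  | cons y ys ih =>
    intro x s
    simp only [List.foldl_cons]
    rw [ih]
    show s + max x 0 + pvS (max x y) ys ys.length = s + pvS x (y :: ys) (ys.length + 1)
    rw [pvS_shift]
    ring

-- A's outer loop invariant, stated in the exact PySem shape the port unfolds to
theorem pvOuter (x : Int) (xs : List Int) : ∀ (m : Nat), m ≤ xs.length →
    (List.range m).foldl
      (fun (dp : List Int) (k : Nat) =>
        PySem.List.pySetD dp (1 + (k : Int))
          ((List.range ((1 : Int) + (k : Int) - 0).toNat).foldl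
            (fun (res : Int) (i : Nat) =>
              max (PySem.List.pyGetD dp (0 + (i : Int)) 0 +
                    ((1 : Int) + (k : Int) - (0 + (i : Int))) * PySem.List.pyGetD (x :: xs) (0 + (i : Int)) 0) res) 0))
      (List.replicate (xs.length + 1) 0)
      = pvDpAt x xs m := by
  intro m
  induction m with
  | zero => intro _; exact (pvDpAt_zero x xs).symm
  | succ m ih =>
    intro hm
    rw [List.range_succ, List.foldl_append, ih (by omega)]
    simp only [List.foldl_cons, List.foldl_nil]
    have hk : (1 : Int) + (m : Int) = ((m + 1 : Nat) : Int) := by push_cast; ring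
    rw [hk, PySem.List.pySetD_natCast]
    have hinner :
        (List.range (((m + 1 : Nat) : Int) - 0).toNat).foldl
          (fun (res : Int) (i : Nat) =>
            max (PySem.List.pyGetD (pvDpAt x xs m) (0 + (i : Int)) 0 +
                  (((m + 1 : Nat) : Int) - (0 + (i : Int))) * PySem.List.pyGetD (x :: xs) (0 + (i : Int)) 0) res) 0
          = pvS x xs (m + 1) := by
      have hr : (((m + 1 : Nat) : Int) - 0).toNat = m + 1 := by omega
      rw [hr]
      have hmain := pvInner x xs (pvDpAt x xs m) (m + 1) (by omega) (by omega)
        (fun i hi => by rw [pvDpAt_getD x xs m i (by omega)]; simp [hi])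
      rw [← hmain]
      apply PySem.List.foldl_congr_mem
      intro b a ha
      simp
    rw [hinner]
    have ht : ((m + 1 : Nat) : Int).toNat = m + 1 := by omega
    rw [pvDpAt_set x xs m (by omega)]

-- ===== VERDICT (by name: the statement is the Claim_ definition above) =====
theorem findMaximumScore1_spec : Claim_equal_findMaximumScore1 := by
  intro nums _ hpre
  unfold Spec_findMaximumScore1
  match nums with
  | [] => exact absurd rfl hpre
  | x :: xs =>
    simp only [findMaximumScore1, findMaximumScore1_alt]
    rw [pvAltFold xs x 0]
    simp only [List.length_cons, PySem.List.pyRange_one, List.foldl_map]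
    have h1 : (((xs.length + 1 : Nat) : Int) - 1).toNat = xs.length := by omega
    rw [h1]
    rw [pvOuter x xs xs.length (le_refl _)]
    have hlen : (pvDpAt x xs xs.length).length = xs.length + 1 := by
      unfold pvDpAt; simp
    rw [PySem.List.pyGetD_neg_ofNat _ 1 0 (by omega) (by omega)]
    simp [pvDpAt]
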